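-- pv_equiv track=rewrite | github.com/posl/comment_recommendation | script/mod_gen/5_time/en/249_B/1.py | is_wonderful_string
-- ===== SOURCE A (Python) =====
-- def is_wonderful_string(s):
--     if not any(c.isupper() for c in s):
--         return False
--     if not any(c.islower() for c in s):
--         return False
--     if len(set(s)) != len(s):
--         return False
--     return True
-- ===== SOURCE B (Python) =====
-- def is_wonderful_string(s):
--     seen = set()
--     has_upper = False
--     has_lower = False
--     for c in s:
--         if c in seen:
--             return False
--         seen.add(c)
--         if c.isupper():
--             has_upper = True
--         if c.islower():
--             has_lower = True
--     return has_upper and has_lower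
-- ===== Notes on version B (the rewrite author's own statement) =====
-- stated objective: faster
-- what changed: Replaces A's three separate scans (two any() passes and a full set(s) build compared by length) with one traversal keeping a seen-set and case flags, returning False at the first repeated character.
import Mathlib
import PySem

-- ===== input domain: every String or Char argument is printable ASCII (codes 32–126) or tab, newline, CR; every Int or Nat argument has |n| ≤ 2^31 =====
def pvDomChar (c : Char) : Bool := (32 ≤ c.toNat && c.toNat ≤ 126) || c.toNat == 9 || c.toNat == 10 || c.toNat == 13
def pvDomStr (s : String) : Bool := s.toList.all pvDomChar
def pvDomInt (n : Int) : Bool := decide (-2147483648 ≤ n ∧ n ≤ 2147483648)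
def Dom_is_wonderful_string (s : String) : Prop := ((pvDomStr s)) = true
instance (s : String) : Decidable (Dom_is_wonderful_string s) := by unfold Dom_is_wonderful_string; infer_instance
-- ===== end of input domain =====

-- ===== PORT A =====
-- B fuses A's three scans into one short-circuiting traversal with a seen-set and case flags (objective: faster, early exit on the first repeated character).
def is_wonderful_string (s : String) : Bool :=
  if !(s.toList.any (fun c => PySem.Chars.isupper c)) then false
  else if !(s.toList.any (fun c => PySem.Chars.islower c)) then false
  else if (PySem.Set.ofList s.toList).length ≠ s.toList.length then false
  else true

-- ===== PORT B =====
def iwsLoop (seen : PySem.Set Char) (hu hl : Bool) : List Char → Bool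
  | [] => hu && hl
  | c :: rest =>
    if PySem.Set.contains seen c then false
    else iwsLoop (PySem.Set.add seen c)
      (if PySem.Chars.isupper c then true else hu)
      (if PySem.Chars.islower c then true else hl) rest

def is_wonderful_string_alt (s : String) : Bool :=
  iwsLoop PySem.Set.empty false false s.toList

-- ===== PRECONDITION & SPEC =====
def Spec_is_wonderful_string (s : String) (out : Bool) : Prop := out = is_wonderful_string_alt s
instance (s : String) (out : Bool) : Decidable (Spec_is_wonderful_string s out) := by unfold Spec_is_wonderful_string; infer_instance

-- ===== CLAIM (what is proved, stated in full; the proofs are below) =====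
def Claim_equal_is_wonderful_string : Prop := ∀ (s : String), Dom_is_wonderful_string s → Spec_is_wonderful_string s (is_wonderful_string s)

-- ===== LEMMAS AND PROOFS =====

theorem contains_add_eq (s : PySem.Set Char) (x y : Char) :
    PySem.Set.contains (PySem.Set.add s x) y = (PySem.Set.contains s y || y == x) := by
  by_cases h : y ∈ PySem.Set.add s x
  · rw [(PySem.Set.contains_iff _ y).mpr h]
    rcases (PySem.Set.mem_add s x y).mp h with h' | h'
    · rw [(PySem.Set.contains_iff s y).mpr h']; rfl
    · simp [h']
  · have h1 : PySem.Set.contains (PySem.Set.add s x) y = false := by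
      simp only [Bool.eq_false_iff]
      intro hh; exact h ((PySem.Set.contains_iff _ y).mp hh)
    have h2 : PySem.Set.contains s y = false := by
      simp only [Bool.eq_false_iff]
      intro hh
      exact h ((PySem.Set.mem_add s x y).mpr (Or.inl ((PySem.Set.contains_iff s y).mp hh)))
    have h3 : (y == x) = false := by
      simp only [beq_eq_false_iff_ne, ne_eq]
      intro hh
      exact h ((PySem.Set.mem_add s x y).mpr (Or.inr hh))
    rw [h1, h2, h3]; rfl

theorem iwsLoop_char (seen : PySem.Set Char) (hu hl : Bool) (cs : List Char) :
    iwsLoop seen hu hl cs =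
      (decide cs.Nodup && cs.all (fun c => !PySem.Set.contains seen c) &&
       ((hu || cs.any (fun c => PySem.Chars.isupper c)) &&
        (hl || cs.any (fun c => PySem.Chars.islower c)))) := by
  induction cs generalizing seen hu hl with
  | nil => simp [iwsLoop]
  | cons c rest ih =>
    simp only [iwsLoop]
    by_cases hsc : PySem.Set.contains seen c = true
    · have hm : c ∈ seen := (PySem.Set.contains_iff seen c).mp hsc
      simp [hm, List.all_cons]
    · rw [Bool.not_eq_true] at hsc
      rw [hsc]
      simp only [Bool.false_eq_true, if_false]
      rw [ih]
      apply Bool.eq_iff_iff.mpr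
      have hall : ∀ (p : Char → Bool),
          (rest.all p = true) ↔ (∀ d ∈ rest, p d = true) := fun p => List.all_eq_true
      simp only [Bool.and_eq_true, Bool.or_eq_true, decide_eq_true_eq, List.nodup_cons,
        List.all_cons, List.any_cons, contains_add_eq, Bool.not_or, hsc, Bool.not_false,
        Bool.true_and, List.all_eq_true, Bool.not_eq_true',
        beq_eq_false_iff_ne, ne_eq]
      constructor
      · rintro ⟨⟨hnd, hdis⟩, hflags⟩
        have hcnot : c ∉ rest := fun hmem => (hdis c hmem).2 rfl
        refine ⟨⟨⟨hcnot, hnd⟩, fun d hd => (hdis d hd).1⟩, ?_⟩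
        cases hU : PySem.Chars.isupper c <;> cases hL : PySem.Chars.islower c <;>
          cases hu <;> cases hl <;> simp_all
      · rintro ⟨⟨⟨hcnot, hnd⟩, hdis⟩, hflags⟩
        refine ⟨⟨hnd, fun d hd => ⟨hdis d hd, fun he => hcnot (he ▸ hd)⟩⟩, ?_⟩
        cases hU : PySem.Chars.isupper c <;> cases hL : PySem.Chars.islower c <;>
          cases hu <;> cases hl <;> simp_all

theorem ofList_length_eq_iff_nodup (xs : List Char) :
    (PySem.Set.ofList xs).length = xs.length ↔ xs.Nodup := by
  constructor
  · intro h
    induction xs with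
    | nil => simp
    | cons x rest ih =>
      rw [PySem.Set.ofList_cons] at h
      by_cases hx : x ∈ rest
      · exfalso
        have hxin : x ∈ PySem.Set.ofList rest := (PySem.Set.mem_ofList rest x).mpr hx
        have hlt : ((PySem.Set.ofList rest).discard x).length <
            (PySem.Set.ofList rest).length := by
          simp only [PySem.Set.discard]
          exact List.length_filter_lt_length_iff_exists.mpr ⟨x, hxin, by simp⟩
        have hle := PySem.Set.length_ofList_le rest
        simp only [List.length_cons] at h
        omega
      · have hdis : (PySem.Set.ofList rest).discard x = PySem.Set.ofList rest := by
          simp only [PySem.Set.discard]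
          apply List.filter_eq_self.mpr
          intro a ha
          have hne : a ≠ x := fun heq => hx (heq ▸ (PySem.Set.mem_ofList rest a).mp ha)
          simp [hne]
        rw [hdis] at h
        simp only [List.length_cons] at h
        exact List.nodup_cons.mpr ⟨hx, ih (by omega)⟩
  · intro h
    rw [PySem.Set.ofList_eq_self_of_nodup xs h]

-- ===== VERDICT (by name: the statement is the Claim_ definition above) =====
theorem is_wonderful_string_spec : Claim_equal_is_wonderful_string := by
  intro s _
  unfold Spec_is_wonderful_string is_wonderful_string is_wonderful_string_alt
  rw [iwsLoop_char]
  have hempty : s.toList.all (fun c => !PySem.Set.contains PySem.Set.empty c) = true := by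
    apply List.all_eq_true.mpr
    intro d _
    rfl
  rw [hempty]
  simp only [Bool.and_true, Bool.false_or]
  split_ifs with h1 h2 h3
  · rw [Bool.not_eq_true'] at h1
    rw [h1]
    simp
  · rw [Bool.not_eq_true'] at h2
    rw [h2]
    simp
  · have hnnd : ¬ s.toList.Nodup := fun hnd =>
      h3 ((ofList_length_eq_iff_nodup s.toList).mpr hnd)
    rw [decide_eq_false hnnd]
    simp
  · simp only [Bool.not_eq_true, Bool.not_eq_false'] at h1 h2
    have hnd : s.toList.Nodup := (ofList_length_eq_iff_nodup s.toList).mp (not_ne_iff.mp h3)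
    rw [decide_eq_true hnd, h1, h2]
    rfl
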